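-- pv_equiv track=rewrite | github.com/brycedbjork/pokerpro | back.py | possible_identity
-- ===== SOURCE A (Python) =====
-- from collections import Counter
--
-- def possible_identity(cards):
-- 	# setup hand dict
-- 	# all are initially set to true
-- 	possible = {
-- 		"royal_flush": True,
-- 		"straight_flush": True,
-- 		"four_of_a_kind": True,
-- 		"full_house": True,
-- 		"flush": True,
-- 		"straight": True,
-- 		"three_of_a_kind": True,
-- 		"two_pair": True,
-- 		"one_pair": True
-- 	}
--
-- 	# generate lists of ranks and suits
-- 	ranks = []
-- 	suits = []
-- 	for card in cards:
-- 		rank = ((card - 1) % 13) + 1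
-- 		suit = (card - 1) // 13
-- 		ranks.append(rank)
-- 		suits.append(suit)
--
-- 	# create Counter objects
-- 	counter_suits = Counter(suits)
-- 	counter_ranks = Counter(ranks)
--
-- 	# get number of cards
-- 	num_of_cards = len(cards)
--
-- 	# get the frequency of the most common suit
-- 	suit_frequency = counter_suits.most_common(1)[0][1]
--
-- 	# check if flush possibility exists
-- 	if suit_frequency < num_of_cards:
-- 		# impossible to get a flush
-- 		possible["royal_flush"] = False
-- 		possible["straight_flush"] = False
-- 		possible["flush"] = False
--
-- 	# check if straight possibility exists
-- 	# first remove duplicates from rank list and sort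
-- 	unique_elements = list(counter_ranks)
-- 	unique_elements.sort()
-- 	# get number of unique elements
-- 	num_unique = len(unique_elements)
-- 	# if there are any duplicates
-- 	if num_unique != num_of_cards:
-- 		# five card straight is impossible
-- 		possible["straight"] = False
-- 		possible["straight_flush"] = False
-- 		possible["royal_flush"] = False
--
-- 	# if straight is not looking royal
-- 	if not all(card in [1, 10, 11, 12, 13] for card in ranks):
-- 		possible["royal_flush"] = False
--
-- 	# if the difference between the elements is >= 5
-- 	if unique_elements[-1] - unique_elements[0] >= 5:
-- 		# five card straight is impossible
-- 		possible["straight"] = False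
-- 		possible["straight_flush"] = False
-- 		possible["royal_flush"] = False
--
-- 	# check two most frequent ranks
-- 	rank_frequency = counter_ranks.most_common(2)
--
-- 	# check if most frequent rank occurs less than num_of_cards - 1
-- 	if rank_frequency[0][1] < num_of_cards - 1:
-- 		# impossible to get a four of a kind
-- 		possible["four_of_a_kind"] = False
--
-- 	# check if most frequent rank occurs less than num_of_cards - 2
-- 	if rank_frequency[0][1] < num_of_cards - 2:
-- 		# impossible to get three of a kind or full house
-- 		possible["three_of_a_kind"] = False
-- 		possible["full_house"] = False
--
-- 	# check if there are two possible frequencies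
-- 	if num_unique >= 2:
-- 		# check if top two frequencies add up to less than num_of_cards - 1
-- 		if rank_frequency[0][1] + rank_frequency[1][1] < num_of_cards - 1:
-- 			# impossible to get two pair
-- 			possible["two_pair"] = False
--
-- 	return possible
-- ===== SOURCE B (Python) =====
-- def possible_identity(cards):
--     n = len(cards)
--     # rank histogram: hist[r] = multiplicity of rank r (ranks are always 1..13)
--     hist = [0] * 14
--     for c in cards:
--         hist[((c - 1) % 13) + 1] += 1
--     # flush possible iff every card sits in the suit of the first card
--     first_suit = (cards[0] - 1) // 13
--     flush = all((c - 1) // 13 == first_suit for c in cards)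
--     no_dup = all(h <= 1 for h in hist)
--     # straight possible iff no duplicate rank and all ranks fit in some 5-wide window
--     straight = no_dup and any(
--         all(s <= r <= s + 4 for r in range(1, 14) if hist[r] > 0)
--         for s in range(1, 14))
--     royal = flush and straight and all(hist[r] == 0 for r in range(2, 10))
--     uniq = sum(1 for h in hist if h > 0)
--     return {
--         "royal_flush": royal,
--         "straight_flush": flush and straight,
--         "four_of_a_kind": any(hist[r] >= n - 1 for r in range(1, 14)),
--         "full_house": any(hist[r] >= n - 2 for r in range(1, 14)),
--         "flush": flush,
--         "straight": straight,
--         "three_of_a_kind": any(hist[r] >= n - 2 for r in range(1, 14)),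
--         "two_pair": uniq < 2 or any(
--             hist[r] + hist[s] >= n - 1
--             for r in range(1, 14) for s in range(1, 14) if r != s),
--         "one_pair": True,
--     }
-- ===== Notes on version B (the rewrite author's own statement) =====
-- stated objective: faster
-- what changed: B replaces A's Counter/most_common/sort machinery and mutate-a-dict-of-True-flags control flow by a fixed 13-slot rank histogram array and one direct existential test per hand (a witness rank for four/three-of-a-kind, a witness pair of distinct ranks for two pair, a witness 5-wide rank window for the straight, an all-same-suit scan for the flush); no sorting and no counter dictionaries.
import Mathlib
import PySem

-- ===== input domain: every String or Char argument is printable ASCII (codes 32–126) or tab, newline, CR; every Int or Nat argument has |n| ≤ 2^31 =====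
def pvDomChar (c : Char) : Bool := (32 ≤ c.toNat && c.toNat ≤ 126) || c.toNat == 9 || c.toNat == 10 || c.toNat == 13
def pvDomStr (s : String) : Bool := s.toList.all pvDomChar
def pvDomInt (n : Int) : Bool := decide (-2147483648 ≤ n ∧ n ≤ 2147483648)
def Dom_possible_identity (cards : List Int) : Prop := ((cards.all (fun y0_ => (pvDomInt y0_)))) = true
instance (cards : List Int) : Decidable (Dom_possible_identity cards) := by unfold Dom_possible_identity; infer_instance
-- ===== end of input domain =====

-- B replaces A's Counter/most_common/sort machinery and flag-falsification control flow by a fixed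
-- 13-slot rank histogram and one direct existential test per hand (objective: faster; measured).

-- ===== PORT A =====
def possible_identity (cards : List Int) : List (String × Bool) :=
  let possible : PySem.Dict String Bool := PySem.Dict.ofList
    [("royal_flush", true), ("straight_flush", true), ("four_of_a_kind", true),
     ("full_house", true), ("flush", true), ("straight", true),
     ("three_of_a_kind", true), ("two_pair", true), ("one_pair", true)]
  -- for card in cards: ranks.append(...); suits.append(...)
  let rs := cards.foldl (fun (p : List Int × List Int) card =>
      (p.1 ++ [PySem.Int.mod (card - 1) 13 + 1], p.2 ++ [PySem.Int.floordiv (card - 1) 13])) ([], [])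
  let ranks := rs.1
  let suits := rs.2
  let counter_suits := PySem.Dict.counter suits
  let counter_ranks := PySem.Dict.counter ranks
  let num_of_cards : Int := (cards.length : Int)
  -- suit_frequency: indexing into most_common raises IndexError on empty input (excluded by Pre_, default unreachable there)
  let suit_frequency :=
    (PySem.List.pyGetD ((PySem.List.sorted counter_suits.items (fun p => p.2) true).take 1) 0 (0, 0)).2
  let possible := if suit_frequency < num_of_cards then
      ((possible.insert "royal_flush" false).insert "straight_flush" false).insert "flush" false
    else possible
  let unique_elements := PySem.List.sorted counter_ranks.keys (fun x => x) false
  let num_unique : Int := (unique_elements.length : Int)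
  let possible := if num_unique ≠ num_of_cards then
      ((possible.insert "straight" false).insert "straight_flush" false).insert "royal_flush" false
    else possible
  let possible := if ¬ (ranks.all (fun card => decide (card ∈ ([1, 10, 11, 12, 13] : List Int)))) = true then
      possible.insert "royal_flush" false
    else possible
  -- the unique_elements endpoint lookups raise IndexError on empty input (excluded by Pre_)
  let possible := if PySem.List.pyGetD unique_elements (-1) 0 - PySem.List.pyGetD unique_elements 0 0 ≥ 5 then
      ((possible.insert "straight" false).insert "straight_flush" false).insert "royal_flush" false
    else possible
  let rank_frequency := (PySem.List.sorted counter_ranks.items (fun p => p.2) true).take 2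
  let possible := if (PySem.List.pyGetD rank_frequency 0 (0, 0)).2 < num_of_cards - 1 then
      possible.insert "four_of_a_kind" false
    else possible
  let possible := if (PySem.List.pyGetD rank_frequency 0 (0, 0)).2 < num_of_cards - 2 then
      (possible.insert "three_of_a_kind" false).insert "full_house" false
    else possible
  let possible := if num_unique ≥ 2 then
      (if (PySem.List.pyGetD rank_frequency 0 (0, 0)).2 + (PySem.List.pyGetD rank_frequency 1 (0, 0)).2
           < num_of_cards - 1 then
        possible.insert "two_pair" false
      else possible)
    else possible
  possible.items

-- ===== PORT B =====
def possible_identity_alt (cards : List Int) : List (String × Bool) :=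
  let n : Int := (cards.length : Int)
  -- rank histogram: hist[r] = multiplicity of rank r (ranks are always 1..13)
  let hist := cards.foldl (fun (h : List Int) c =>
      PySem.List.pySetD h (PySem.Int.mod (c - 1) 13 + 1)
        (PySem.List.pyGetD h (PySem.Int.mod (c - 1) 13 + 1) 0 + 1))
    (List.replicate 14 (0 : Int))
  -- reading the first card raises IndexError on empty input (excluded by Pre_, default unreachable there)
  let first_suit := PySem.Int.floordiv (PySem.List.pyGetD cards 0 0 - 1) 13
  let flush := cards.all (fun c => decide (PySem.Int.floordiv (c - 1) 13 = first_suit))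
  let no_dup := hist.all (fun h => decide (h ≤ 1))
  let straight := no_dup && (PySem.List.pyRange 1 14 1).any (fun s =>
      ((PySem.List.pyRange 1 14 1).filter (fun r => decide (0 < PySem.List.pyGetD hist r 0))).all
        (fun r => decide (s ≤ r) && decide (r ≤ s + 4)))
  let royal := flush && straight &&
      (PySem.List.pyRange 2 10 1).all (fun r => decide (PySem.List.pyGetD hist r 0 = 0))
  let uniq := hist.foldl (fun (a : Int) h => if 0 < h then a + 1 else a) 0
  [("royal_flush", royal),
   ("straight_flush", flush && straight),
   ("four_of_a_kind", (PySem.List.pyRange 1 14 1).any (fun r => decide (PySem.List.pyGetD hist r 0 ≥ n - 1))),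
   ("full_house", (PySem.List.pyRange 1 14 1).any (fun r => decide (PySem.List.pyGetD hist r 0 ≥ n - 2))),
   ("flush", flush),
   ("straight", straight),
   ("three_of_a_kind", (PySem.List.pyRange 1 14 1).any (fun r => decide (PySem.List.pyGetD hist r 0 ≥ n - 2))),
   ("two_pair", decide (uniq < 2) || (PySem.List.pyRange 1 14 1).any (fun r =>
       ((PySem.List.pyRange 1 14 1).filter (fun s => decide (r ≠ s))).any
         (fun s => decide (PySem.List.pyGetD hist r 0 + PySem.List.pyGetD hist s 0 ≥ n - 1)))),
   ("one_pair", true)]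

-- ===== PRECONDITION & SPEC =====
-- On the empty list A raises IndexError (indexing into most_common) and B raises IndexError
-- (reading the first card); Pre_ excludes exactly that input.
def Pre_possible_identity (cards : List Int) : Prop := cards ≠ []
instance (cards : List Int) : Decidable (Pre_possible_identity cards) := by unfold Pre_possible_identity; infer_instance
def pvWitness_possible_identity : List Int := [1, 12, 25, 51]

def Spec_possible_identity (cards : List Int) (out : List (String × Bool)) : Prop := out = possible_identity_alt cards
instance (cards : List Int) (out : List (String × Bool)) : Decidable (Spec_possible_identity cards out) := by unfold Spec_possible_identity; infer_instance

-- ===== CLAIM (what is proved, stated in full; the proofs are below) =====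
def Claim_equal_possible_identity : Prop := ∀ (cards : List Int), Dom_possible_identity cards → Pre_possible_identity cards → Spec_possible_identity cards (possible_identity cards)

-- ===== LEMMAS AND PROOFS =====

theorem pv_rk_bounds (c : Int) :
    1 ≤ PySem.Int.mod (c - 1) 13 + 1 ∧ PySem.Int.mod (c - 1) 13 + 1 ≤ 13 := by
  have h1 := PySem.Int.mod_nonneg (c - 1) (b := 13) (by norm_num)
  have h2 := PySem.Int.mod_lt (c - 1) (b := 13) (by norm_num)
  omega

theorem pv_pyGetD_zero_cons {α : Type} (x : α) (t : List α) (d : α) :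
    PySem.List.pyGetD (x :: t) 0 d = x := by
  simp [PySem.List.pyGetD, PySem.List.pyGet?, PySem.List.pyIdx?]

theorem pv_pyGetD_one {α : Type} (x y : α) (t : List α) (d : α) :
    PySem.List.pyGetD (x :: y :: t) 1 d = y := by
  simp [PySem.List.pyGetD, PySem.List.pyGet?, PySem.List.pyIdx?]

theorem pv_pyGetD_neg_one {α : Type} (xs : List α) (h : xs ≠ []) (d : α)
    (hl : xs.length - 1 < xs.length) :
    PySem.List.pyGetD xs (-1) d = xs[xs.length - 1] := by
  have hlen : 1 ≤ xs.length := by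
    cases xs with | nil => exact absurd rfl h | cons a t => simp
  simp [PySem.List.pyGetD, PySem.List.pyGet?, PySem.List.pyIdx?, hlen,
    List.getElem?_eq_getElem hl]

-- head of a descending sort (no key) is the maximum
theorem pv_head_sorted_rev_eq_max (vs : List Int) (h : vs ≠ []) :
    PySem.List.pyGetD (PySem.List.sorted vs (fun x => x) true) 0 0
      = (PySem.List.max? vs (fun x => x)).getD 0 := by
  cases hs : PySem.List.sorted vs (fun x => x) true with
  | nil => exact absurd ((PySem.List.sorted_eq_nil_iff vs _ true).mp hs) h
  | cons m t =>
    cases hm : PySem.List.max? vs (fun x => x) with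
    | none => exact absurd ((PySem.List.max?_eq_none_iff vs _).mp hm) h
    | some mx =>
      rw [pv_pyGetD_zero_cons]
      have hmem : m ∈ vs := by
        have : m ∈ PySem.List.sorted vs (fun x => x) true := by rw [hs]; exact List.mem_cons_self
        exact (PySem.List.mem_sorted vs _ true m).mp this
      have hmxmem : mx ∈ vs := PySem.List.max?_mem hm
      exact le_antisymm (PySem.List.max?_isMax hm m hmem)
        (PySem.List.key_head_sorted_rev_ge vs (fun x => x) hs mx hmxmem)

-- projecting the key out of a key-sorted list sorts the keys
theorem pv_map_snd_sorted_rev {α : Type} (l : List (α × Int)) :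
    (PySem.List.sorted l (fun p => p.2) true).map Prod.snd
      = PySem.List.sorted (l.map Prod.snd) (fun x => x) true := by
  apply PySem.List.eq_of_perm_of_pairwise_le_of_injective (key := fun x : Int => -x)
    (fun a b hab => by simpa using hab)
  · exact ((PySem.List.sorted_perm l _ true).map Prod.snd).trans
      ((PySem.List.sorted_perm (l.map Prod.snd) _ true).symm)
  · exact (List.pairwise_map.mpr ((PySem.List.sorted_pairwise_rev l (fun p => p.2)).imp
      (fun hab => by simpa using hab)))
  · exact (PySem.List.sorted_pairwise_rev (l.map Prod.snd) (fun x => x)).imp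
      (fun hab => by simpa using hab)

theorem pv_take_pyGetD_zero {α : Type} (l : List α) (h : l ≠ []) (k : Nat) (hk : 0 < k) (d : α) :
    PySem.List.pyGetD (l.take k) 0 d = PySem.List.pyGetD l 0 d := by
  cases l with
  | nil => exact absurd rfl h
  | cons x t =>
    cases k with
    | zero => omega
    | succ k => simp [List.take_succ_cons]

theorem pv_take2_pyGetD_one {α : Type} (l : List α) (h : 2 ≤ l.length) (d : α) :
    PySem.List.pyGetD (l.take 2) 1 d = PySem.List.pyGetD l 1 d := by
  match l, h with
  | x :: y :: t, _ => simp [pv_pyGetD_one]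

-- last element of the ascending sort of set(xs) is max(xs); head is min(xs)
theorem pv_sorted_ofList_last_eq_max (xs : List Int) (h : xs ≠ []) :
    PySem.List.pyGetD (PySem.List.sorted (PySem.Set.ofList xs) (fun x => x) false) (-1) 0
      = (PySem.List.max? xs (fun x => x)).getD 0 := by
  set u := PySem.List.sorted (PySem.Set.ofList xs) (fun x => x) false with hu
  have hmemu : ∀ y, y ∈ u ↔ y ∈ xs := fun y => by
    rw [hu, PySem.List.mem_sorted, PySem.Set.mem_ofList]
  have hune : u ≠ [] := by
    obtain ⟨x, t, rfl⟩ := List.exists_cons_of_ne_nil h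
    intro hnil
    have := (hmemu x).mpr List.mem_cons_self
    simp [hnil] at this
  have hlu : u.length - 1 < u.length := by
    have := List.length_pos_of_ne_nil hune
    omega
  rw [pv_pyGetD_neg_one u hune 0 hlu]
  cases hm : PySem.List.max? xs (fun x => x) with
  | none => exact absurd ((PySem.List.max?_eq_none_iff xs _).mp hm) h
  | some mx =>
    have hlast_mem : u[u.length - 1] ∈ xs := (hmemu _).mp (List.getElem_mem hlu)
    have hub : ∀ y ∈ u, y ≤ u[u.length - 1] := by
      intro y hy
      obtain ⟨p, hp, rfl⟩ := List.getElem_of_mem hy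
      have := PySem.List.key_sorted_getElem_mono (PySem.Set.ofList xs) (fun x => x)
        (p := p) (q := u.length - 1) (by omega) (by rw [← hu]; omega)
      simpa [← hu] using this
    have hmx_mem_u : mx ∈ u := (hmemu mx).mpr (PySem.List.max?_mem hm)
    simp only [Option.getD_some]
    exact le_antisymm (PySem.List.max?_isMax hm _ hlast_mem) (hub mx hmx_mem_u)

theorem pv_sorted_ofList_head_eq_min (xs : List Int) (h : xs ≠ []) :
    PySem.List.pyGetD (PySem.List.sorted (PySem.Set.ofList xs) (fun x => x) false) 0 0
      = (PySem.List.min? xs (fun x => x)).getD 0 := by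
  cases hs : PySem.List.sorted (PySem.Set.ofList xs) (fun x => x) false with
  | nil =>
    have hnil : PySem.Set.ofList xs = [] := (PySem.List.sorted_eq_nil_iff _ _ false).mp hs
    obtain ⟨x, t, rfl⟩ := List.exists_cons_of_ne_nil h
    have hmem := (PySem.Set.mem_ofList (x :: t) x).mpr List.mem_cons_self
    rw [hnil] at hmem
    exact absurd hmem (List.not_mem_nil)
  | cons m t =>
    cases hm : PySem.List.min? xs (fun x => x) with
    | none => exact absurd ((PySem.List.min?_eq_none_iff xs _).mp hm) h
    | some mn =>
      rw [pv_pyGetD_zero_cons]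
      have hmem : m ∈ xs := by
        have : m ∈ PySem.List.sorted (PySem.Set.ofList xs) (fun x => x) false := by
          rw [hs]; exact List.mem_cons_self
        rw [PySem.List.mem_sorted, PySem.Set.mem_ofList] at this; exact this
      have hmn_mem : mn ∈ PySem.Set.ofList xs := (PySem.Set.mem_ofList xs mn).mpr (PySem.List.min?_mem hm)
      simp only [Option.getD_some]
      exact le_antisymm (PySem.List.key_head_sorted_le (PySem.Set.ofList xs) (fun x => x) hs mn hmn_mem)
        (PySem.List.min?_isMin hm m hmem)

-- every value of Counter(xs) is at most len(xs)
theorem pv_counter_max_le (xs : List Int) :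
    (PySem.List.max? ((PySem.Dict.counter xs).items.map Prod.snd) (fun x => x)).getD 0
      ≤ (xs.length : Int) := by
  cases hm : PySem.List.max? ((PySem.Dict.counter xs).items.map Prod.snd) (fun x => x) with
  | none => simp
  | some mx =>
    have hmem : mx ∈ (PySem.Dict.counter xs).items.map Prod.snd := PySem.List.max?_mem hm
    simp only [PySem.Dict.items_counter, List.map_map, List.mem_map] at hmem
    obtain ⟨k, _, hk⟩ := hmem
    simp only [Function.comp] at hk
    have := List.count_le_length (l := xs) (a := k)
    simp only [Option.getD_some, ← hk]
    exact_mod_cast this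

theorem dictChain_items (n sf nu lastu firstu t1 t2 : Int) (allroyalb : Bool) :
    (let possible : PySem.Dict String Bool := PySem.Dict.ofList
      [("royal_flush", true), ("straight_flush", true), ("four_of_a_kind", true),
       ("full_house", true), ("flush", true), ("straight", true),
       ("three_of_a_kind", true), ("two_pair", true), ("one_pair", true)]
     let possible := if sf < n then
        ((possible.insert "royal_flush" false).insert "straight_flush" false).insert "flush" false
      else possible
     let possible := if nu ≠ n then
        ((possible.insert "straight" false).insert "straight_flush" false).insert "royal_flush" false
      else possible
     let possible := if ¬ allroyalb = true then possible.insert "royal_flush" false else possible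
     let possible := if lastu - firstu ≥ 5 then
        ((possible.insert "straight" false).insert "straight_flush" false).insert "royal_flush" false
      else possible
     let possible := if t1 < n - 1 then possible.insert "four_of_a_kind" false else possible
     let possible := if t1 < n - 2 then
        (possible.insert "three_of_a_kind" false).insert "full_house" false
      else possible
     let possible := if nu ≥ 2 then
        (if t1 + t2 < n - 1 then possible.insert "two_pair" false else possible)
      else possible
     possible.items) =
    [("royal_flush", !decide (sf < n) && !decide (nu ≠ n) && allroyalb && !decide (lastu - firstu ≥ 5)),
     ("straight_flush", !decide (sf < n) && !decide (nu ≠ n) && !decide (lastu - firstu ≥ 5)),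
     ("four_of_a_kind", !decide (t1 < n - 1)),
     ("full_house", !decide (t1 < n - 2)),
     ("flush", !decide (sf < n)),
     ("straight", !decide (nu ≠ n) && !decide (lastu - firstu ≥ 5)),
     ("three_of_a_kind", !decide (t1 < n - 2)),
     ("two_pair", !(decide (nu ≥ 2) && decide (t1 + t2 < n - 1))),
     ("one_pair", true)] := by
  simp only [← Bool.cond_decide]
  generalize decide (sf < n) = b1
  generalize decide (nu ≠ n) = b2
  generalize decide (lastu - firstu ≥ 5) = b4
  generalize decide (t1 < n - 1) = b5
  generalize decide (t1 < n - 2) = b6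
  generalize decide (nu ≥ 2) = b7
  generalize decide (t1 + t2 < n - 1) = b8
  cases allroyalb <;> cases b1 <;> cases b2 <;> cases b4 <;> cases b5 <;> cases b6 <;>
    cases b7 <;> cases b8 <;> rfl

theorem pv_snd_pyGetD (l : List (Int × Int)) (i : Int) :
    (PySem.List.pyGetD l i (0, 0)).2 = PySem.List.pyGetD (l.map Prod.snd) i 0 :=
  (PySem.List.pyGetD_map Prod.snd l i (0, 0)).symm

-- the count stored at position 0 of most_common is position 0 of the descending-sorted counts
theorem pv_mc0 (l : List (Int × Int)) (hne : l ≠ []) (k : Nat) (hk : 0 < k) :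
    (PySem.List.pyGetD ((PySem.List.sorted l (fun p => p.2) true).take k) 0 (0, 0)).2
      = PySem.List.pyGetD (PySem.List.sorted (l.map Prod.snd) (fun x => x) true) 0 0 := by
  have hsne : PySem.List.sorted l (fun p => p.2) true ≠ [] := by
    rw [Ne, PySem.List.sorted_eq_nil_iff]; exact hne
  rw [pv_take_pyGetD_zero _ hsne k hk, pv_snd_pyGetD, pv_map_snd_sorted_rev]

theorem pv_bang {p q : Prop} [Decidable p] [Decidable q] (h : ¬p ↔ q) : (!decide p) = decide q := by
  rw [← decide_not]; exact decide_eq_decide.mpr h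

-- ===== B-side lemmas: the histogram fold computes rank counts =====

theorem pv_hist_fold (cs : List Int) (h : List Int) (hlen : h.length = 14) :
    (cs.foldl (fun (h : List Int) c =>
        PySem.List.pySetD h (PySem.Int.mod (c - 1) 13 + 1)
          (PySem.List.pyGetD h (PySem.Int.mod (c - 1) 13 + 1) 0 + 1)) h).length = 14 ∧
    ∀ i : Nat, i < 14 →
      (cs.foldl (fun (h : List Int) c =>
          PySem.List.pySetD h (PySem.Int.mod (c - 1) 13 + 1)
            (PySem.List.pyGetD h (PySem.Int.mod (c - 1) 13 + 1) 0 + 1)) h).getD i 0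
        = h.getD i 0 + ((cs.map (fun c => PySem.Int.mod (c - 1) 13 + 1)).count (i : Int) : Int) := by
  induction cs generalizing h with
  | nil => exact ⟨hlen, by simp⟩
  | cons c cs ih =>
    have hb := pv_rk_bounds c
    have hset : PySem.List.pySetD h (PySem.Int.mod (c - 1) 13 + 1)
          (PySem.List.pyGetD h (PySem.Int.mod (c - 1) 13 + 1) 0 + 1)
        = h.set (PySem.Int.mod (c - 1) 13 + 1).toNat
            (PySem.List.pyGetD h (PySem.Int.mod (c - 1) 13 + 1) 0 + 1) :=
      PySem.List.pySetD_of_nonneg _ _ (by omega)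
    have hlen' : (h.set (PySem.Int.mod (c - 1) 13 + 1).toNat
        (PySem.List.pyGetD h (PySem.Int.mod (c - 1) 13 + 1) 0 + 1)).length = 14 := by
      simp [hlen]
    obtain ⟨hL, hG⟩ := ih _ hlen'
    simp only [List.foldl_cons, hset]
    refine ⟨hL, ?_⟩
    intro i hi
    rw [hG i hi]
    have hgd : (h.set (PySem.Int.mod (c - 1) 13 + 1).toNat
          (PySem.List.pyGetD h (PySem.Int.mod (c - 1) 13 + 1) 0 + 1)).getD i 0
        = if (PySem.Int.mod (c - 1) 13 + 1).toNat = i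
          then PySem.List.pyGetD h (PySem.Int.mod (c - 1) 13 + 1) 0 + 1
          else h.getD i 0 := by
      by_cases hij : (PySem.Int.mod (c - 1) 13 + 1).toNat = i
      · subst hij
        rw [if_pos rfl, List.getD_eq_getElem _ _ (by omega), List.getElem_set_self]
      · rw [if_neg hij, List.getD_eq_getElem _ _ (by simp [hlen]; omega),
          List.getD_eq_getElem _ _ (by omega), List.getElem_set_ne hij]
    rw [hgd]
    have hpg : PySem.List.pyGetD h (PySem.Int.mod (c - 1) 13 + 1) 0
        = h.getD (PySem.Int.mod (c - 1) 13 + 1).toNat 0 := by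
      rw [PySem.List.pyGetD_eq_getElem _ _ (by omega) (by simp [hlen]; omega),
        List.getD_eq_getElem _ _ (by omega)]
    rw [hpg]
    rw [List.map_cons, List.count_cons]
    by_cases hij : (PySem.Int.mod (c - 1) 13 + 1).toNat = i
    · have hbeq : ((PySem.Int.mod (c - 1) 13 + 1) == (i : Int)) = true := by
        rw [beq_iff_eq]; omega
      rw [if_pos hij, hij, hbeq, if_pos rfl]
      push_cast
      ring
    · have hbeq : ((PySem.Int.mod (c - 1) 13 + 1) == (i : Int)) = false := by
        rw [beq_eq_false_iff_ne]; omega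
      rw [if_neg hij, hbeq]
      simp

theorem pv_hist_eq (cards : List Int) :
    (cards.foldl (fun (h : List Int) c =>
        PySem.List.pySetD h (PySem.Int.mod (c - 1) 13 + 1)
          (PySem.List.pyGetD h (PySem.Int.mod (c - 1) 13 + 1) 0 + 1))
      (List.replicate 14 (0 : Int)))
      = (List.range 14).map (fun k =>
          (((cards.map (fun c => PySem.Int.mod (c - 1) 13 + 1)).count ((k : Nat) : Int) : Int))) := by
  obtain ⟨hL, hG⟩ := pv_hist_fold cards (List.replicate 14 (0 : Int)) (by simp)
  apply List.ext_getElem (by rw [hL]; simp)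
  intro i h1 h2
  have hi : i < 14 := by rw [hL] at h1; exact h1
  have hgi := hG i hi
  rw [← List.getD_eq_getElem _ (0 : Int) h1, ← List.getD_eq_getElem _ (0 : Int) h2, hgi,
    List.getD_eq_getElem _ _ (show i < (List.replicate 14 (0 : Int)).length by simpa using hi),
    List.getD_eq_getElem _ _ h2]
  rw [List.getElem_replicate]
  simp

theorem pv_getD_histmap (f : Int → Int) (r : Int) (h0 : 0 ≤ r) (h1 : r < 14) :
    PySem.List.pyGetD ((List.range 14).map (fun k => f ((k : Nat) : Int))) r 0 = f r := by
  rw [PySem.List.pyGetD_eq_getElem _ _ h0 (by simp; omega)]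
  simp only [List.getElem_map, List.getElem_range]
  congr 1
  omega

theorem pv_hist_getD (cards : List Int) (r : Int) (h0 : 0 ≤ r) (h1 : r < 14) :
    PySem.List.pyGetD ((List.range 14).map (fun k =>
        (((cards.map (fun c => PySem.Int.mod (c - 1) 13 + 1)).count ((k : Nat) : Int) : Int)))) r 0
      = (((cards.map (fun c => PySem.Int.mod (c - 1) 13 + 1)).count r : Nat) : Int) := by
  rw [pv_getD_histmap (fun j => (((cards.map (fun c => PySem.Int.mod (c - 1) 13 + 1)).count j : Nat) : Int)) r h0 h1]

-- set(xs) has as many elements as xs exactly when xs has no duplicates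
theorem pv_setLen_iff (l : List Int) : (PySem.Set.ofList l).length = l.length ↔ l.Nodup := by
  constructor
  · intro hlen
    have hperm : (PySem.Set.ofList l).Perm l.dedup := by
      rw [List.perm_ext_iff_of_nodup (PySem.Set.nodup_ofList l) l.nodup_dedup]
      intro a
      rw [PySem.Set.mem_ofList, List.mem_dedup]
    have hdl : l.dedup.length = l.length := by rw [← hperm.length_eq, hlen]
    rw [← List.dedup_eq_self]
    exact (List.dedup_sublist l).eq_of_length hdl
  · intro hnd
    rw [PySem.Set.ofList_eq_self_of_nodup l hnd]

-- ===== per-flag equivalences (cards ≠ []) =====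

theorem pv_flush_eq (cards : List Int) (hne : cards ≠ []) :
    decide ((PySem.List.max? ((PySem.Dict.counter
          (cards.map (fun c => PySem.Int.floordiv (c - 1) 13))).items.map Prod.snd)
        (fun x => x)).getD 0 = (cards.length : Int))
      = cards.all (fun c => decide (PySem.Int.floordiv (c - 1) 13
          = PySem.Int.floordiv (PySem.List.pyGetD cards 0 0 - 1) 13)) := by
  obtain ⟨c0, rest, rfl⟩ := List.exists_cons_of_ne_nil hne
  rw [pv_pyGetD_zero_cons]
  have hVeq : ((PySem.Dict.counter ((c0 :: rest).map (fun c => PySem.Int.floordiv (c - 1) 13))).items.map Prod.snd)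
      = (PySem.Set.ofList ((c0 :: rest).map (fun c => PySem.Int.floordiv (c - 1) 13))).map
          (fun k => ((((c0 :: rest).map (fun c => PySem.Int.floordiv (c - 1) 13)).count k : Nat) : Int)) := by
    rw [PySem.Dict.items_counter, List.map_map]
    rfl
  have hub := pv_counter_max_le ((c0 :: rest).map (fun c => PySem.Int.floordiv (c - 1) 13))
  set SU := (c0 :: rest).map (fun c => PySem.Int.floordiv (c - 1) 13) with hSU
  have hmemSU : PySem.Int.floordiv (c0 - 1) 13 ∈ SU := by
    rw [hSU]
    exact List.mem_map_of_mem List.mem_cons_self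
  have hlenSU : SU.length = (c0 :: rest).length := by rw [hSU, List.length_map]
  rw [hVeq] at hub ⊢
  rw [Bool.eq_iff_iff, decide_eq_true_iff, List.all_eq_true]
  cases hmax : PySem.List.max? ((PySem.Set.ofList SU).map (fun k => ((SU.count k : Nat) : Int)))
      (fun x => x) with
  | none =>
    exfalso
    have hnil := (PySem.List.max?_eq_none_iff _ _).mp hmax
    have hmem : ((SU.count (PySem.Int.floordiv (c0 - 1) 13) : Nat) : Int)
        ∈ (PySem.Set.ofList SU).map (fun k => ((SU.count k : Nat) : Int)) :=
      List.mem_map_of_mem ((PySem.Set.mem_ofList _ _).mpr hmemSU)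
    rw [hnil] at hmem
    exact List.not_mem_nil hmem
  | some mx =>
    rw [hmax] at hub
    simp only [Option.getD_some] at hub ⊢
    constructor
    · intro hMN c hc
      obtain ⟨k0, hk0, hkeq⟩ := List.mem_map.mp (PySem.List.max?_mem hmax)
      have hcnt : SU.count k0 = SU.length := by omega
      have hall := List.count_eq_length.mp hcnt
      have h2 := (hall _ (List.mem_map_of_mem hc : PySem.Int.floordiv (c - 1) 13 ∈ SU)).symm
      have h3 := (hall _ hmemSU).symm
      rw [decide_eq_true_iff, h2, h3]
    · intro hall
      have hcnt : SU.count (PySem.Int.floordiv (c0 - 1) 13) = SU.length :=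
        List.count_eq_length.mpr (by
          intro b hb
          rw [hSU] at hb
          obtain ⟨c, hc, rfl⟩ := List.mem_map.mp hb
          exact (decide_eq_true_iff.mp (hall c hc)).symm)
      have hmem : ((SU.count (PySem.Int.floordiv (c0 - 1) 13) : Nat) : Int)
          ∈ (PySem.Set.ofList SU).map (fun k => ((SU.count k : Nat) : Int)) :=
        List.mem_map_of_mem ((PySem.Set.mem_ofList _ _).mpr hmemSU)
      have hle := PySem.List.max?_isMax hmax _ hmem
      simp only at hle
      omega

theorem pv_nodup_eq (cards : List Int) :
    decide (((PySem.Set.ofList (cards.map (fun c => PySem.Int.mod (c - 1) 13 + 1))).length : Int)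
        = (cards.length : Int))
      = ((List.range 14).map (fun k =>
          (((cards.map (fun c => PySem.Int.mod (c - 1) 13 + 1)).count ((k : Nat) : Int) : Int)))).all
          (fun h => decide (h ≤ 1)) := by
  rw [Bool.eq_iff_iff, decide_eq_true_iff, List.all_eq_true]
  have hlen : (cards.map (fun c => PySem.Int.mod (c - 1) 13 + 1)).length = cards.length := by
    simp
  constructor
  · intro hUN x hx
    obtain ⟨k, hk, rfl⟩ := List.mem_map.mp hx
    have hnd : (cards.map (fun c => PySem.Int.mod (c - 1) 13 + 1)).Nodup :=
      (pv_setLen_iff _).mp (by omega)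
    have := List.nodup_iff_count_le_one.mp hnd ((k : Nat) : Int)
    rw [decide_eq_true_iff]
    exact_mod_cast this
  · intro hall
    have hnd : (cards.map (fun c => PySem.Int.mod (c - 1) 13 + 1)).Nodup := by
      rw [List.nodup_iff_count_le_one]
      intro a
      by_cases hmem : a ∈ cards.map (fun c => PySem.Int.mod (c - 1) 13 + 1)
      · obtain ⟨c, hc, hrk⟩ := List.mem_map.mp hmem
        have hb := pv_rk_bounds c
        have ha : ((a.toNat : Nat) : Int) = a := Int.toNat_of_nonneg (by omega)
        have hmm := hall _ (List.mem_map_of_mem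
          (List.mem_range.mpr (show a.toNat < 14 by omega)))
        rw [decide_eq_true_iff, ha] at hmm
        exact_mod_cast hmm
      · have := List.count_eq_zero_of_not_mem hmem
        omega
    have := (pv_setLen_iff _).mpr hnd
    omega

theorem pv_window_eq (cards : List Int) (hne : cards ≠ []) :
    decide ((PySem.List.max? (cards.map (fun c => PySem.Int.mod (c - 1) 13 + 1)) (fun x => x)).getD 0
        - (PySem.List.min? (cards.map (fun c => PySem.Int.mod (c - 1) 13 + 1)) (fun x => x)).getD 0 < 5)
      = (PySem.List.pyRange 1 14 1).any (fun s =>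
          ((PySem.List.pyRange 1 14 1).filter (fun r =>
              decide (0 < PySem.List.pyGetD ((List.range 14).map (fun k =>
                (((cards.map (fun c => PySem.Int.mod (c - 1) 13 + 1)).count ((k : Nat) : Int) : Int)))) r 0))).all
            (fun r => decide (s ≤ r) && decide (r ≤ s + 4))) := by
  have hRKne : cards.map (fun c => PySem.Int.mod (c - 1) 13 + 1) ≠ [] := by simpa using hne
  rw [Bool.eq_iff_iff, decide_eq_true_iff, List.any_eq_true]
  cases hmax : PySem.List.max? (cards.map (fun c => PySem.Int.mod (c - 1) 13 + 1)) (fun x => x) with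
  | none => exact absurd ((PySem.List.max?_eq_none_iff _ _).mp hmax) hRKne
  | some X =>
  cases hmin : PySem.List.min? (cards.map (fun c => PySem.Int.mod (c - 1) 13 + 1)) (fun x => x) with
  | none => exact absurd ((PySem.List.min?_eq_none_iff _ _).mp hmin) hRKne
  | some Y =>
  simp only [Option.getD_some]
  have hXmem := PySem.List.max?_mem hmax
  have hYmem := PySem.List.min?_mem hmin
  obtain ⟨cx, hcx, hx⟩ := List.mem_map.mp hXmem
  obtain ⟨cy, hcy, hy⟩ := List.mem_map.mp hYmem
  have hbx := pv_rk_bounds cx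
  have hby := pv_rk_bounds cy
  constructor
  · intro hlt
    refine ⟨Y, (PySem.List.mem_pyRange_one).mpr ⟨by omega, by omega⟩, ?_⟩
    rw [List.all_eq_true]
    intro r hr
    obtain ⟨hr1, hr2⟩ := List.mem_filter.mp hr
    rw [PySem.List.mem_pyRange_one] at hr1
    rw [decide_eq_true_iff, pv_hist_getD cards r (by omega) (by omega)] at hr2
    have hrmem : r ∈ cards.map (fun c => PySem.Int.mod (c - 1) 13 + 1) := by
      rw [← List.count_pos_iff]
      omega
    have h1 := PySem.List.min?_isMin hmin r hrmem
    have h2 := PySem.List.max?_isMax hmax r hrmem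
    simp only at h1 h2
    rw [Bool.and_eq_true, decide_eq_true_iff, decide_eq_true_iff]
    exact ⟨h1, by omega⟩
  · rintro ⟨s, hsmem, hall⟩
    rw [PySem.List.mem_pyRange_one] at hsmem
    rw [List.all_eq_true] at hall
    have hfil : ∀ z : Int, z ∈ cards.map (fun c => PySem.Int.mod (c - 1) 13 + 1) →
        1 ≤ z → z < 14 → s ≤ z ∧ z ≤ s + 4 := by
      intro z hz h1z h2z
      have hzf := hall z (List.mem_filter.mpr ⟨(PySem.List.mem_pyRange_one).mpr ⟨h1z, h2z⟩, by
        rw [decide_eq_true_iff, pv_hist_getD cards z (by omega) (by omega)]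
        have := List.count_pos_iff.mpr hz
        omega⟩)
      rw [Bool.and_eq_true, decide_eq_true_iff, decide_eq_true_iff] at hzf
      exact hzf
    have hXw := hfil X hXmem (by omega) (by omega)
    have hYw := hfil Y hYmem (by omega) (by omega)
    omega

theorem pv_top1_eq (cards : List Int) (hne : cards ≠ []) (k : Int) :
    decide (PySem.List.pyGetD (PySem.List.sorted
        ((PySem.Dict.counter (cards.map (fun c => PySem.Int.mod (c - 1) 13 + 1))).items.map Prod.snd)
        (fun x => x) true) 0 0 ≥ k)
      = (PySem.List.pyRange 1 14 1).any (fun r =>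
          decide (PySem.List.pyGetD ((List.range 14).map (fun j =>
            (((cards.map (fun c => PySem.Int.mod (c - 1) 13 + 1)).count ((j : Nat) : Int) : Int)))) r 0 ≥ k)) := by
  have hRKne : cards.map (fun c => PySem.Int.mod (c - 1) 13 + 1) ≠ [] := by simpa using hne
  have hVeq : ((PySem.Dict.counter (cards.map (fun c => PySem.Int.mod (c - 1) 13 + 1))).items.map Prod.snd)
      = (PySem.Set.ofList (cards.map (fun c => PySem.Int.mod (c - 1) 13 + 1))).map
          (fun j => (((cards.map (fun c => PySem.Int.mod (c - 1) 13 + 1)).count j : Nat) : Int)) := by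
    rw [PySem.Dict.items_counter, List.map_map]
    rfl
  rw [hVeq]
  have hVne : (PySem.Set.ofList (cards.map (fun c => PySem.Int.mod (c - 1) 13 + 1))).map
      (fun j => (((cards.map (fun c => PySem.Int.mod (c - 1) 13 + 1)).count j : Nat) : Int)) ≠ [] := by
    intro hc
    rw [List.map_eq_nil_iff] at hc
    obtain ⟨a, t, ha⟩ := List.exists_cons_of_ne_nil hRKne
    have : a ∈ PySem.Set.ofList (cards.map (fun c => PySem.Int.mod (c - 1) 13 + 1)) :=
      (PySem.Set.mem_ofList _ _).mpr (ha ▸ List.mem_cons_self)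
    rw [hc] at this
    exact List.not_mem_nil this
  rw [pv_head_sorted_rev_eq_max _ hVne]
  rw [Bool.eq_iff_iff, decide_eq_true_iff, List.any_eq_true]
  cases hmax : PySem.List.max? ((PySem.Set.ofList (cards.map (fun c => PySem.Int.mod (c - 1) 13 + 1))).map
      (fun j => (((cards.map (fun c => PySem.Int.mod (c - 1) 13 + 1)).count j : Nat) : Int))) (fun x => x) with
  | none => exact absurd ((PySem.List.max?_eq_none_iff _ _).mp hmax) hVne
  | some mx =>
  simp only [Option.getD_some]
  constructor
  · intro hk
    obtain ⟨r0, hr0, hcnt⟩ := List.mem_map.mp (PySem.List.max?_mem hmax)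
    have hr0RK : r0 ∈ cards.map (fun c => PySem.Int.mod (c - 1) 13 + 1) :=
      (PySem.Set.mem_ofList _ _).mp hr0
    obtain ⟨c, hc, hrk⟩ := List.mem_map.mp hr0RK
    have hb := pv_rk_bounds c
    refine ⟨r0, (PySem.List.mem_pyRange_one).mpr ⟨by omega, by omega⟩, ?_⟩
    rw [decide_eq_true_iff, pv_hist_getD cards r0 (by omega) (by omega)]
    omega
  · rintro ⟨r, hr, hdec⟩
    rw [PySem.List.mem_pyRange_one] at hr
    rw [decide_eq_true_iff, pv_hist_getD cards r (by omega) (by omega)] at hdec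
    by_cases hmem : r ∈ cards.map (fun c => PySem.Int.mod (c - 1) 13 + 1)
    · have hmV : (((cards.map (fun c => PySem.Int.mod (c - 1) 13 + 1)).count r : Nat) : Int)
          ∈ (PySem.Set.ofList (cards.map (fun c => PySem.Int.mod (c - 1) 13 + 1))).map
            (fun j => (((cards.map (fun c => PySem.Int.mod (c - 1) 13 + 1)).count j : Nat) : Int)) :=
        List.mem_map_of_mem ((PySem.Set.mem_ofList _ _).mpr hmem)
      have := PySem.List.max?_isMax hmax _ hmV
      simp only at this
      omega
    · have hc0 : (cards.map (fun c => PySem.Int.mod (c - 1) 13 + 1)).count r = 0 :=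
        List.count_eq_zero_of_not_mem hmem
      obtain ⟨r0, hr0, hcnt⟩ := List.mem_map.mp (PySem.List.max?_mem hmax)
      have hr0RK : r0 ∈ cards.map (fun c => PySem.Int.mod (c - 1) 13 + 1) :=
        (PySem.Set.mem_ofList _ _).mp hr0
      have := List.count_pos_iff.mpr hr0RK
      omega

theorem pv_royal_eq (cards : List Int) :
    (cards.map (fun c => PySem.Int.mod (c - 1) 13 + 1)).all
        (fun card => decide (card ∈ ([1, 10, 11, 12, 13] : List Int)))
      = (PySem.List.pyRange 2 10 1).all (fun r =>
          decide (PySem.List.pyGetD ((List.range 14).map (fun j =>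
            (((cards.map (fun c => PySem.Int.mod (c - 1) 13 + 1)).count ((j : Nat) : Int) : Int)))) r 0 = 0)) := by
  rw [Bool.eq_iff_iff, List.all_eq_true, List.all_eq_true]
  constructor
  · intro hall r hr
    rw [PySem.List.mem_pyRange_one] at hr
    rw [decide_eq_true_iff, pv_hist_getD cards r (by omega) (by omega)]
    have hnm : r ∉ cards.map (fun c => PySem.Int.mod (c - 1) 13 + 1) := by
      intro hmem
      have := decide_eq_true_iff.mp (hall r hmem)
      simp only [List.mem_cons, List.not_mem_nil, or_false] at this
      omega
    have := List.count_eq_zero_of_not_mem hnm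
    omega
  · intro hall c hc
    obtain ⟨x, hx, rfl⟩ := List.mem_map.mp hc
    have hb := pv_rk_bounds x
    rw [decide_eq_true_iff]
    by_cases hmid : 2 ≤ PySem.Int.mod (x - 1) 13 + 1 ∧ PySem.Int.mod (x - 1) 13 + 1 < 10
    · exfalso
      have hmem := hall _ ((PySem.List.mem_pyRange_one).mpr hmid)
      rw [decide_eq_true_iff, pv_hist_getD cards _ (by omega) (by omega)] at hmem
      have hin : PySem.Int.mod (x - 1) 13 + 1 ∈ cards.map (fun c => PySem.Int.mod (c - 1) 13 + 1) :=
        List.mem_map_of_mem hx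
      rw [← List.count_pos_iff] at hin
      omega
    · simp only [List.mem_cons, List.not_mem_nil, or_false]
      omega

theorem pv_uniq_eq (cards : List Int) :
    (List.countP (fun x => decide (0 < x)) ((List.range 14).map (fun k =>
        (((cards.map (fun c => PySem.Int.mod (c - 1) 13 + 1)).count ((k : Nat) : Int) : Int)))))
      = (PySem.Set.ofList (cards.map (fun c => PySem.Int.mod (c - 1) 13 + 1))).length := by
  rw [List.countP_map, List.countP_eq_length_filter]
  have hperm : (PySem.Set.ofList (cards.map (fun c => PySem.Int.mod (c - 1) 13 + 1))).Perm
      (((List.range 14).filter ((fun x => decide (0 < x)) ∘ (fun k =>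
          (((cards.map (fun c => PySem.Int.mod (c - 1) 13 + 1)).count ((k : Nat) : Int) : Int))))).map
        (fun k => ((k : Nat) : Int))) := by
    rw [List.perm_ext_iff_of_nodup (PySem.Set.nodup_ofList _)
      ((List.nodup_range.filter _).map (fun a b hab => by exact_mod_cast hab))]
    intro a
    rw [PySem.Set.mem_ofList]
    constructor
    · intro ha
      obtain ⟨c, hc, hrk⟩ := List.mem_map.mp ha
      have hb := pv_rk_bounds c
      have hnn : ((a.toNat : Nat) : Int) = a := Int.toNat_of_nonneg (by omega)
      refine List.mem_map.mpr ⟨a.toNat,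
        List.mem_filter.mpr ⟨List.mem_range.mpr (by omega), ?_⟩, hnn⟩
      simp only [Function.comp_apply, decide_eq_true_eq]
      rw [hnn]
      have := List.count_pos_iff.mpr ha
      omega
    · intro ha
      obtain ⟨k, hk, hrk⟩ := List.mem_map.mp ha
      obtain ⟨hk14, hpos⟩ := List.mem_filter.mp hk
      simp only [Function.comp_apply, decide_eq_true_eq] at hpos
      subst hrk
      rw [← List.count_pos_iff]
      omega
  have hl := hperm.length_eq
  rw [List.length_map] at hl
  exact hl.symm

theorem pv_pair_eq (cards : List Int)
    (hU : 2 ≤ (PySem.Set.ofList (cards.map (fun c => PySem.Int.mod (c - 1) 13 + 1))).length) :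
    decide (PySem.List.pyGetD (PySem.List.sorted
          ((PySem.Dict.counter (cards.map (fun c => PySem.Int.mod (c - 1) 13 + 1))).items.map Prod.snd)
          (fun x => x) true) 0 0
        + PySem.List.pyGetD (PySem.List.sorted
          ((PySem.Dict.counter (cards.map (fun c => PySem.Int.mod (c - 1) 13 + 1))).items.map Prod.snd)
          (fun x => x) true) 1 0
        ≥ (cards.length : Int) - 1)
      = (PySem.List.pyRange 1 14 1).any (fun r =>
          ((PySem.List.pyRange 1 14 1).filter (fun s => decide (r ≠ s))).any
            (fun s => decide (PySem.List.pyGetD ((List.range 14).map (fun j =>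
                (((cards.map (fun c => PySem.Int.mod (c - 1) 13 + 1)).count ((j : Nat) : Int) : Int)))) r 0
              + PySem.List.pyGetD ((List.range 14).map (fun j =>
                (((cards.map (fun c => PySem.Int.mod (c - 1) 13 + 1)).count ((j : Nat) : Int) : Int)))) s 0
              ≥ (cards.length : Int) - 1))) := by
  have hVeq : ((PySem.Dict.counter (cards.map (fun c => PySem.Int.mod (c - 1) 13 + 1))).items.map Prod.snd)
      = (PySem.Set.ofList (cards.map (fun c => PySem.Int.mod (c - 1) 13 + 1))).map
          (fun j => (((cards.map (fun c => PySem.Int.mod (c - 1) 13 + 1)).count j : Nat) : Int)) := by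
    rw [PySem.Dict.items_counter, List.map_map]
    rfl
  rw [hVeq]
  set RK := cards.map (fun c => PySem.Int.mod (c - 1) 13 + 1) with hRK
  set K := PySem.Set.ofList RK with hKdef
  set V := K.map (fun j => ((RK.count j : Nat) : Int)) with hVdef
  have hRKbounds : ∀ a ∈ RK, 1 ≤ a ∧ a ≤ 13 := by
    intro a ha
    rw [hRK] at ha
    obtain ⟨c, hc, hrk⟩ := List.mem_map.mp ha
    have := pv_rk_bounds c
    omega
  have h2 : 2 ≤ (PySem.List.sorted V (fun x => x) true).length := by
    rw [PySem.List.length_sorted, hVdef, List.length_map]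
    exact hU
  obtain ⟨v0, v1, t, hs⟩ : ∃ v0 v1 t, PySem.List.sorted V (fun x => x) true = v0 :: v1 :: t := by
    cases hsx : PySem.List.sorted V (fun x => x) true with
    | nil => rw [hsx] at h2; simp at h2
    | cons a t1 =>
      cases t1 with
      | nil => rw [hsx] at h2; simp at h2
      | cons b t2 => exact ⟨a, b, t2, rfl⟩
  rw [hs, pv_pyGetD_zero_cons, pv_pyGetD_one]
  have hperm : V.Perm (v0 :: v1 :: t) := (hs ▸ PySem.List.sorted_perm V (fun x => x) true).symm
  have hpw := PySem.List.sorted_pairwise_rev V (fun x => x)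
  rw [hs, List.pairwise_cons] at hpw
  obtain ⟨hv0ge, hpw1⟩ := hpw
  rw [List.pairwise_cons] at hpw1
  obtain ⟨hv1ge, _⟩ := hpw1
  have hvals : ∀ v ∈ V, 1 ≤ v := by
    intro v hv
    rw [hVdef] at hv
    obtain ⟨k0, hk0, hke⟩ := List.mem_map.mp hv
    have := List.count_pos_iff.mpr ((PySem.Set.mem_ofList _ _).mp hk0)
    omega
  have hv0V : v0 ∈ V := hperm.mem_iff.mpr List.mem_cons_self
  have hv1V : v1 ∈ V := hperm.mem_iff.mpr (List.mem_cons_of_mem _ List.mem_cons_self)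
  have hv0max : ∀ v ∈ V, v ≤ v0 := by
    intro v hv
    have hv' : v ∈ v0 :: v1 :: t := hperm.mem_iff.mp hv
    rcases List.mem_cons.mp hv' with h | h
    · omega
    · exact hv0ge v h
  have hcountP1 : List.countP (fun x => decide (v1 < x)) V ≤ 1 := by
    rw [List.Perm.countP_eq _ hperm, List.countP_cons, List.countP_cons]
    have h0 : List.countP (fun x => decide (v1 < x)) t = 0 := List.countP_eq_zero.mpr (by
      intro x hx
      simp only [decide_eq_true_eq, not_lt]
      exact hv1ge x hx)
    rw [h0]
    simp only [Nat.zero_add, decide_eq_true_eq]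
    split_ifs <;> omega
  rw [Bool.eq_iff_iff, decide_eq_true_iff, List.any_eq_true]
  constructor
  · intro hsum
    obtain ⟨r, hrK, hrc⟩ := List.mem_map.mp (hVdef ▸ hv0V)
    have hKperm : K.Perm (r :: K.erase r) := List.perm_cons_erase hrK
    have hVperm : V.Perm (((RK.count r : Nat) : Int) :: (K.erase r).map (fun j => ((RK.count j : Nat) : Int))) := by
      rw [hVdef]
      exact hKperm.map _
    have hcons : (v1 :: t).Perm ((K.erase r).map (fun j => ((RK.count j : Nat) : Int))) := by
      have hx : (v0 :: v1 :: t).Perm (v0 :: (K.erase r).map (fun j => ((RK.count j : Nat) : Int))) :=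
        hperm.symm.trans (hrc ▸ hVperm)
      exact (List.perm_cons v0).mp hx
    have hv1mem : v1 ∈ (K.erase r).map (fun j => ((RK.count j : Nat) : Int)) :=
      hcons.subset List.mem_cons_self
    obtain ⟨s', hs'K, hsc⟩ := List.mem_map.mp hv1mem
    have hneq : r ≠ s' := by
      intro hx
      subst hx
      exact ((PySem.Set.nodup_ofList RK).not_mem_erase) hs'K
    have hs'mem : s' ∈ K := by
      rcases eq_or_ne s' r with hx | hx
      · exact absurd hx.symm hneq
      · exact ((List.mem_erase_of_ne hx).mp hs'K)
    have hrb := hRKbounds r ((PySem.Set.mem_ofList _ _).mp hrK)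
    have hsb := hRKbounds s' ((PySem.Set.mem_ofList _ _).mp hs'mem)
    refine ⟨r, (PySem.List.mem_pyRange_one).mpr ⟨by omega, by omega⟩, ?_⟩
    rw [List.any_eq_true]
    refine ⟨s', List.mem_filter.mpr ⟨(PySem.List.mem_pyRange_one).mpr ⟨by omega, by omega⟩,
      by rw [decide_eq_true_iff]; exact hneq⟩, ?_⟩
    rw [decide_eq_true_iff, pv_hist_getD cards r (by omega) (by omega),
      pv_hist_getD cards s' (by omega) (by omega)]
    rw [← hRK]
    omega
  · rintro ⟨r, hr, hinner⟩
    rw [PySem.List.mem_pyRange_one] at hr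
    rw [List.any_eq_true] at hinner
    obtain ⟨s', hs'f, hdec⟩ := hinner
    obtain ⟨hs'r, hs'ne⟩ := List.mem_filter.mp hs'f
    rw [PySem.List.mem_pyRange_one] at hs'r
    rw [decide_eq_true_iff] at hs'ne
    rw [decide_eq_true_iff, pv_hist_getD cards r (by omega) (by omega),
      pv_hist_getD cards s' (by omega) (by omega), ← hRK] at hdec
    have hv0p := hvals v0 hv0V
    have hv1p := hvals v1 hv1V
    by_cases hrp : 0 < RK.count r
    · by_cases hsp : 0 < RK.count s'
      · have hrK : r ∈ K := (PySem.Set.mem_ofList _ _).mpr (List.count_pos_iff.mp hrp)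
        have hsK : s' ∈ K := (PySem.Set.mem_ofList _ _).mpr (List.count_pos_iff.mp hsp)
        have hcrv0 : ((RK.count r : Nat) : Int) ≤ v0 := hv0max _ (List.mem_map_of_mem hrK)
        have hcsv0 : ((RK.count s' : Nat) : Int) ≤ v0 := hv0max _ (List.mem_map_of_mem hsK)
        have hnot : ¬ (v1 < ((RK.count r : Nat) : Int) ∧ v1 < ((RK.count s' : Nat) : Int)) := by
          rintro ⟨hlt1, hlt2⟩
          have hge2 : 2 ≤ List.countP (fun x => decide (v1 < x)) V := by
            rw [hVdef, List.countP_map, (List.perm_cons_erase hrK).countP_eq, List.countP_cons]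
            have hs'in : s' ∈ K.erase r := (List.mem_erase_of_ne (Ne.symm hs'ne)).mpr hsK
            have hpos : 0 < List.countP ((fun x => decide (v1 < x)) ∘ fun j => ((RK.count j : Nat) : Int))
                (K.erase r) :=
              Nat.pos_of_ne_zero (fun hz => by
                have := List.countP_eq_zero.mp hz s' hs'in
                simp only [Function.comp_apply, decide_eq_true_eq, not_lt] at this
                omega)
            have hpr : ((fun x => decide (v1 < x)) ∘ fun j => ((RK.count j : Nat) : Int)) r = true := by
              simp only [Function.comp_apply, decide_eq_true_eq]
              exact hlt1
            rw [hpr, if_pos rfl]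
            omega
          omega
        omega
      · have hcrv0 : ((RK.count r : Nat) : Int) ≤ v0 := hv0max _ (List.mem_map_of_mem
          ((PySem.Set.mem_ofList _ _).mpr (List.count_pos_iff.mp hrp)))
        omega
    · by_cases hsp : 0 < RK.count s'
      · have hcsv0 : ((RK.count s' : Nat) : Int) ≤ v0 := hv0max _ (List.mem_map_of_mem
          ((PySem.Set.mem_ofList _ _).mpr (List.count_pos_iff.mp hsp)))
        omega
      · omega

theorem possible_identity_main (cards : List Int) (h : cards ≠ []) :
    possible_identity cards = possible_identity_alt cards := by
  simp only [possible_identity, possible_identity_alt]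
  rw [PySem.List.foldl_prod_mk
    (f := fun (a : List Int) card => a ++ [PySem.Int.mod (card - 1) 13 + 1])
    (g := fun (a : List Int) card => a ++ [PySem.Int.floordiv (card - 1) 13])]
  simp only [PySem.List.foldl_append_singleton_eq_map, List.nil_append]
  rw [dictChain_items, pv_hist_eq]
  rw [PySem.List.foldl_ite_add_one]
  have hrne : (cards.map (fun x => PySem.Int.mod (x - 1) 13 + 1)) ≠ [] := by simpa using h
  have hsne : (cards.map (fun x => PySem.Int.floordiv (x - 1) 13)) ≠ [] := by simpa using h
  have hitems : ∀ (xs : List Int), xs ≠ [] → (PySem.Dict.counter xs).items ≠ [] := by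
    intro xs hxs
    rw [PySem.Dict.items_counter]
    obtain ⟨x, t, rfl⟩ := List.exists_cons_of_ne_nil hxs
    have : x ∈ PySem.Set.ofList (x :: t) := (PySem.Set.mem_ofList _ x).mpr List.mem_cons_self
    intro hcon
    rw [List.map_eq_nil_iff] at hcon
    rw [hcon] at this
    exact List.not_mem_nil this
  rw [pv_mc0 _ (hitems _ hsne) 1 (by omega), pv_mc0 _ (hitems _ hrne) 2 (by omega)]
  rw [pv_head_sorted_rev_eq_max _ (by simpa using hitems _ hsne)]
  rw [PySem.Dict.keys_counter]
  simp only [PySem.List.length_sorted]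
  rw [pv_sorted_ofList_last_eq_max _ hrne, pv_sorted_ofList_head_eq_min _ hrne]
  rw [← pv_flush_eq cards h, ← pv_nodup_eq cards, ← pv_window_eq cards h,
      ← pv_royal_eq cards, ← pv_top1_eq cards h ((cards.length : Int) - 1),
      ← pv_top1_eq cards h ((cards.length : Int) - 2), pv_uniq_eq cards]
  have hbound := pv_counter_max_le (cards.map (fun x => PySem.Int.floordiv (x - 1) 13))
  rw [List.length_map] at hbound
  set N : Int := (cards.length : Int) with hN
  set M : Int := (PySem.List.max?
      ((PySem.Dict.counter (cards.map (fun x => PySem.Int.floordiv (x - 1) 13))).items.map Prod.snd)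
      (fun x => x)).getD 0 with hM
  set UZ : Int := ((PySem.Set.ofList (cards.map (fun x => PySem.Int.mod (x - 1) 13 + 1))).length : Int) with hUZ
  set X : Int := (PySem.List.max? (cards.map (fun x => PySem.Int.mod (x - 1) 13 + 1)) (fun x => x)).getD 0 with hX
  set Y : Int := (PySem.List.min? (cards.map (fun x => PySem.Int.mod (x - 1) 13 + 1)) (fun x => x)).getD 0 with hY
  set T1 : Int := PySem.List.pyGetD (PySem.List.sorted
      ((PySem.Dict.counter (cards.map (fun x => PySem.Int.mod (x - 1) 13 + 1))).items.map Prod.snd)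
      (fun x => x) true) 0 0 with hT1
  rw [show (!decide (M < N)) = decide (M = N) from pv_bang (by omega)]
  rw [show (!decide (UZ ≠ N)) = decide (UZ = N) from pv_bang (by omega)]
  rw [show (!decide (X - Y ≥ 5)) = decide (X - Y < 5) from pv_bang (by omega)]
  rw [show (!decide (T1 < N - 1)) = decide (T1 ≥ N - 1) from pv_bang (by omega)]
  rw [show (!decide (T1 < N - 2)) = decide (T1 ≥ N - 2) from pv_bang (by omega)]
  simp only [List.cons.injEq, Prod.mk.injEq, true_and, and_true]
  refine ⟨?_, ?_, ?_⟩
  -- royal_flush: same atoms, associated differently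
  · generalize decide (M = N) = b1
    generalize decide (UZ = N) = b2
    generalize (cards.map (fun x => PySem.Int.mod (x - 1) 13 + 1)).all
        (fun card => decide (card ∈ ([1, 10, 11, 12, 13] : List Int))) = b3
    generalize decide (X - Y < 5) = b4
    cases b1 <;> cases b2 <;> cases b3 <;> cases b4 <;> rfl
  -- straight_flush: same atoms, associated differently
  · generalize decide (M = N) = b1
    generalize decide (UZ = N) = b2
    generalize decide (X - Y < 5) = b4
    cases b1 <;> cases b2 <;> cases b4 <;> rfl
  -- two_pair
  · by_cases h2 : (2 : Int) ≤ UZ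
    · have h2n : 2 ≤ (PySem.List.sorted
          (PySem.Dict.counter (cards.map (fun x => PySem.Int.mod (x - 1) 13 + 1))).items
          (fun p => p.2) true).length := by
        rw [PySem.List.length_sorted, PySem.Dict.items_counter, List.length_map]
        rw [hUZ] at h2
        exact_mod_cast h2
      rw [pv_take2_pyGetD_one _ h2n, pv_snd_pyGetD, pv_map_snd_sorted_rev]
      set T2 : Int := PySem.List.pyGetD (PySem.List.sorted
          ((PySem.Dict.counter (cards.map (fun x => PySem.Int.mod (x - 1) 13 + 1))).items.map Prod.snd)
          (fun x => x) true) 1 0 with hT2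
      have e1 : decide (UZ ≥ 2) = true := by rw [decide_eq_true_iff]; omega
      have e2 : decide (0 + UZ < 2) = false := by rw [decide_eq_false_iff_not]; omega
      rw [e1, e2, Bool.true_and, Bool.false_or]
      rw [show (!decide (T1 + T2 < N - 1)) = decide (T1 + T2 ≥ N - 1) from pv_bang (by omega)]
      have hU' : 2 ≤ (PySem.Set.ofList (cards.map (fun c => PySem.Int.mod (c - 1) 13 + 1))).length := by
        rw [hUZ] at h2
        exact_mod_cast h2
      exact pv_pair_eq cards hU'
    · have e1 : decide (UZ ≥ 2) = false := by rw [decide_eq_false_iff_not]; omega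
      have e2 : decide (0 + UZ < 2) = true := by rw [decide_eq_true_iff]; omega
      rw [e1, e2, Bool.false_and, Bool.true_or, Bool.not_false]

-- ===== VERDICT (by name: the statement is the Claim_ definition above) =====
theorem possible_identity_spec : Claim_equal_possible_identity := by
  intro cards _ hpre
  unfold Spec_possible_identity
  exact possible_identity_main cards hpre
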